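-- pv_equiv track=rewrite | github.com/ernestoyaquello/AdventOfCode | 2021/day19.py | calculate_variations
-- ===== SOURCE A (Python) =====
-- def calculate_variations(rotations_per_axis, scanner):
--     scanner_variations = []
--
--     # Use brute force to calculate all the possible variations based on rotations (4 x 4 x 4 = 64 in total).
--     # Ideally, I would do something clever here to calculate only the 24 non-repeated variations there really are,
--     # but I couldn't figure out how to do it, so I brute-forced my way out of the problem. Nasty, but it works.
--     for number_of_rotations in [0, 1, 2, 3]:
--         rotations_per_axis.append(number_of_rotations)
--         if len(rotations_per_axis) == 3:
--             rotated_scanner = []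
--             for coordinate in scanner:
--                 rotated_coordinate = [coordinate[0], coordinate[1], coordinate[2]]
--                 for rotation_axis_index, rotating_axis_indices in enumerate([[2, 1], [0, 2], [1, 0]]):
--                     number_of_rotations = rotations_per_axis[rotation_axis_index]
--                     while number_of_rotations > 0:
--                         aux = rotated_coordinate[rotating_axis_indices[0]]
--                         rotated_coordinate[rotating_axis_indices[0]] = rotated_coordinate[rotating_axis_indices[1]]
--                         rotated_coordinate[rotating_axis_indices[1]] = -aux
--                         number_of_rotations -= 1
--                 rotated_scanner.append((rotated_coordinate[0], rotated_coordinate[1], rotated_coordinate[2]))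
--             scanner_variations.append(rotated_scanner)
--         else:
--             scanner_variations.extend(calculate_variations(rotations_per_axis, scanner))
--         rotations_per_axis.pop()
--
--     # Remove variations that are repeated so we can have only the 24 unique ones we were looking for
--     if len(rotations_per_axis) == 0:
--         scanner_unique_variations = []
--         for scanner_variation in scanner_variations:
--             if scanner_variation not in scanner_unique_variations:
--                 scanner_unique_variations.append(scanner_variation)
--         scanner_variations = scanner_unique_variations
--
--     return scanner_variations
-- ===== SOURCE B (Python) =====
-- # Iterative re-implementation: build the remaining rotation-count tuples as an
-- # explicit product (no recursion, argument not mutated), rotate each coordinate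
-- # count times per axis, and dedup with a set only for a top-level call.
--
-- def _rotate(coordinate, counts):
--     x, y, z = coordinate
--     for _ in range(counts[0]):  # rotate around axis 0: swap indices 2,1 then negate
--         x, y, z = x, -z, y
--     for _ in range(counts[1]):  # rotate around axis 1: swap indices 0,2 then negate
--         x, y, z = z, y, -x
--     for _ in range(counts[2]):  # rotate around axis 2: swap indices 1,0 then negate
--         x, y, z = -y, x, z
--     return (x, y, z)
--
--
-- def calculate_variations(rotations_per_axis, scanner):
--     prefix = list(rotations_per_axis)
--     remaining = 3 - len(prefix)
--     # cartesian product range(4)^remaining, first position varying slowest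
--     suffixes = [[]]
--     for _ in range(remaining):
--         suffixes = [s + [n] for s in suffixes for n in range(4)]
--     variations = [[_rotate(c, prefix + s) for c in scanner] for s in suffixes]
--     if not prefix:
--         seen = set()
--         unique = []
--         for variation in variations:
--             key = tuple(variation)
--             if key not in seen:
--                 seen.add(key)
--                 unique.append(variation)
--         variations = unique
--     return variations
-- ===== Notes on version B (the rewrite author's own statement) =====
-- stated objective: idiomatic
-- what changed: Replaced the argument-mutating 4-way recursion with an iterative cartesian product of the remaining rotation counts and a set-based first-occurrence dedup done only for top-level calls.
import Mathlib
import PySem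

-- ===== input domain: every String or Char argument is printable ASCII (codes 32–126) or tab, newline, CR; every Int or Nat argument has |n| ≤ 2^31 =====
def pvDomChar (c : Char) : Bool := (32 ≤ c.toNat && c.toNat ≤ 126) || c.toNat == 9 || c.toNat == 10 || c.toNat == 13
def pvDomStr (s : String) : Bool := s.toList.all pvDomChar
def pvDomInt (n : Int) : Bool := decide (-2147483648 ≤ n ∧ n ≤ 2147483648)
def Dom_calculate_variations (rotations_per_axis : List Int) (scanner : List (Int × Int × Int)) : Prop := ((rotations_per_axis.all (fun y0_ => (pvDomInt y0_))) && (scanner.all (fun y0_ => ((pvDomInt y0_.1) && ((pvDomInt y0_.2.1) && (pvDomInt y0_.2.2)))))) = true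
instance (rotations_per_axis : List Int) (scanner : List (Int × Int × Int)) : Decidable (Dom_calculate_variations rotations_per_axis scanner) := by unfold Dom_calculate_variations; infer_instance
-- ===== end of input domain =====

-- B replaces A's argument-mutating 4-way recursion by an iterative cartesian product of the
-- remaining rotation counts with a set-based dedup (idiomatic; return value unchanged on Pre_;
-- A temporarily mutates rotations_per_axis but restores it, B never touches it).

-- ===== PORT A =====
-- Effect on the coordinate triple of A's two list assignments for axis i
-- (rotating_axis_indices [2,1] / [0,2] / [1,0]: aux := c[i0]; c[i0] := c[i1]; c[i1] := -aux).
def aRotStep (axis : Nat) (p : Int × Int × Int) : Int × Int × Int :=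
  match axis, p with
  | 0, (x, y, z) => (x, -z, y)
  | 1, (x, y, z) => (z, y, -x)
  | _, (x, y, z) => (-y, x, z)

-- A's 'while number_of_rotations > 0' loop
def aWhile (axis : Nat) (k : Int) (p : Int × Int × Int) : Int × Int × Int :=
  if 0 < k then aWhile axis (k - 1) (aRotStep axis p) else p
termination_by k.toNat
decreasing_by omega

-- A's 'for rotation_axis_index, rotating_axis_indices in enumerate(...)' loop over one coordinate
-- (in this branch rotations_per_axis has exactly 3 entries, so getD's default is never used)
def aRotCoord (rpa : List Int) (c : Int × Int × Int) : Int × Int × Int :=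
  aWhile 2 (rpa.getD 2 0) (aWhile 1 (rpa.getD 1 0) (aWhile 0 (rpa.getD 0 0) c))

-- A's recursive body; the fuel (= 3 - len at every reachable call) only guards termination:
-- Python recurses forever once the list reaches length ≥ 3, which Pre_ excludes.
def aLoop : Nat → List Int → List (Int × Int × Int) → List (List (Int × Int × Int))
  | 0, rpa, scanner =>
    -- fuel exhausted: only the len-3 branch can contribute (unreachable under Pre_, where
    -- Python would otherwise recurse forever)
    [0, 1, 2, 3].foldl
      (fun acc n =>
        if (rpa ++ [n]).length = 3 then
          acc ++ [scanner.map (fun c => aRotCoord (rpa ++ [n]) c)]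
        else acc) []
  | fuel + 1, rpa, scanner =>
    [0, 1, 2, 3].foldl
      (fun acc n =>
        if (rpa ++ [n]).length = 3 then
          acc ++ [scanner.map (fun c => aRotCoord (rpa ++ [n]) c)]
        else acc ++ aLoop fuel (rpa ++ [n]) scanner) []

def calculate_variations (rotations_per_axis : List Int) (scanner : List (Int × Int × Int)) :
    List (List (Int × Int × Int)) :=
  let scanner_variations := aLoop (3 - rotations_per_axis.length) rotations_per_axis scanner
  if rotations_per_axis.length = 0 then
    -- A's 'if scanner_variation not in scanner_unique_variations: append' dedup loop
    scanner_variations.foldl (fun acc v => if v ∈ acc then acc else acc ++ [v]) []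
  else scanner_variations

-- ===== PORT B =====
-- the three 'x, y, z = …' rotation steps of Source B's _rotate
def bStep0 (p : Int × Int × Int) : Int × Int × Int := (p.1, -p.2.2, p.2.1)
def bStep1 (p : Int × Int × Int) : Int × Int × Int := (p.2.2, p.2.1, -p.1)
def bStep2 (p : Int × Int × Int) : Int × Int × Int := (-p.2.1, p.1, p.2.2)

-- Source B's _rotate: each 'for _ in range(counts[i])' loop (counts always has ≥ 3 entries;
-- range of a negative count is empty, hence .toNat)
def bRotate (c : Int × Int × Int) (counts : List Int) : Int × Int × Int :=
  bStep2^[(counts.getD 2 0).toNat]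
    (bStep1^[(counts.getD 1 0).toNat]
      (bStep0^[(counts.getD 0 0).toNat] c))

-- Source B's product loop: suffixes = [s + [n] for s in suffixes for n in range(4)], repeated
def bSuffixes : Nat → List (List Int)
  | 0 => [[]]
  | n + 1 => (bSuffixes n).flatMap (fun s => [0, 1, 2, 3].map (fun v => s ++ [v]))

-- Source B's set-based first-occurrence dedup loop
def bDedup (variations : List (List (Int × Int × Int))) : List (List (Int × Int × Int)) :=
  (variations.foldl
    (fun (st : PySem.Set (List (Int × Int × Int)) × List (List (Int × Int × Int))) v =>
      if PySem.Set.contains st.1 v then st else (PySem.Set.add st.1 v, st.2 ++ [v]))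
    (PySem.Set.empty, [])).2

def calculate_variations_alt (rotations_per_axis : List Int)
    (scanner : List (Int × Int × Int)) : List (List (Int × Int × Int)) :=
  let variations := (bSuffixes (3 - rotations_per_axis.length)).map
    (fun s => scanner.map (fun c => bRotate c (rotations_per_axis ++ s)))
  if rotations_per_axis.isEmpty then bDedup variations else variations

-- ===== PRECONDITION & SPEC =====
-- Pre_ excludes exactly the lists of length ≥ 3, on which A recurses with no reachable
-- base case and raises RecursionError.
def Pre_calculate_variations (rotations_per_axis : List Int) (scanner : List (Int × Int × Int)) : Prop :=
  rotations_per_axis.length ≤ 2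
instance (rotations_per_axis : List Int) (scanner : List (Int × Int × Int)) : Decidable (Pre_calculate_variations rotations_per_axis scanner) := by unfold Pre_calculate_variations; infer_instance
def pvWitness_calculate_variations : List Int × (List (Int × Int × Int)) := ([0, 1], [(1, 2, 3)])

def Spec_calculate_variations (rotations_per_axis : List Int) (scanner : List (Int × Int × Int)) (out : List (List (Int × Int × Int))) : Prop := out = calculate_variations_alt rotations_per_axis scanner
instance (rotations_per_axis : List Int) (scanner : List (Int × Int × Int)) (out : List (List (Int × Int × Int))) : Decidable (Spec_calculate_variations rotations_per_axis scanner out) := by unfold Spec_calculate_variations; infer_instance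

-- ===== CLAIM (what is proved, stated in full; the proofs are below) =====
def Claim_equal_calculate_variations : Prop := ∀ (rotations_per_axis : List Int) (scanner : List (Int × Int × Int)), Dom_calculate_variations rotations_per_axis scanner → Pre_calculate_variations rotations_per_axis scanner → Spec_calculate_variations rotations_per_axis scanner (calculate_variations rotations_per_axis scanner)
-- ===== LEMMAS AND PROOFS =====

theorem aWhile_natCast (axis : Nat) (n : Nat) (p : Int × Int × Int) :
    aWhile axis (n : Int) p = (aRotStep axis)^[n] p := by
  induction n generalizing p with
  | zero => simp [aWhile]
  | succ m ih =>
    rw [aWhile, if_pos (by exact_mod_cast Nat.succ_pos m)]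
    have h2 : ((m + 1 : Nat) : Int) - 1 = (m : Int) := by push_cast; ring
    rw [h2, ih, Function.iterate_succ_apply]

theorem aWhile_toNat (axis : Nat) (k : Int) (p : Int × Int × Int) :
    aWhile axis k p = (aRotStep axis)^[k.toNat] p := by
  by_cases h : 0 ≤ k
  · lift k to Nat using h
    simp [aWhile_natCast]
  · rw [aWhile, if_neg (by omega), Int.toNat_of_nonpos (by omega), Function.iterate_zero_apply]

theorem step0_eq : aRotStep 0 = bStep0 := by
  funext p; obtain ⟨x, y, z⟩ := p; rfl
theorem step1_eq : aRotStep 1 = bStep1 := by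
  funext p; obtain ⟨x, y, z⟩ := p; rfl
theorem step2_eq : aRotStep 2 = bStep2 := by
  funext p; obtain ⟨x, y, z⟩ := p; rfl

theorem rot_eq (counts : List Int) (c : Int × Int × Int) :
    aRotCoord counts c = bRotate c counts := by
  unfold aRotCoord bRotate
  rw [aWhile_toNat, aWhile_toNat, aWhile_toNat, step0_eq, step1_eq, step2_eq]

theorem loop1 (a b : Int) (scanner : List (Int × Int × Int)) :
    aLoop 1 [a, b] scanner
      = (bSuffixes 1).map (fun s => scanner.map (fun c => bRotate c ([a, b] ++ s))) := by
  simp [aLoop, bSuffixes, List.foldl, rot_eq]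

theorem loop2 (a : Int) (scanner : List (Int × Int × Int)) :
    aLoop 2 [a] scanner
      = (bSuffixes 2).map (fun s => scanner.map (fun c => bRotate c ([a] ++ s))) := by
  simp [aLoop, bSuffixes, List.foldl, List.flatMap, rot_eq]

theorem loop3 (scanner : List (Int × Int × Int)) :
    aLoop 3 [] scanner
      = (bSuffixes 3).map (fun s => scanner.map (fun c => bRotate c s)) := by
  simp [aLoop, bSuffixes, List.foldl, List.flatMap, rot_eq]

theorem dedup_eq_aux (l : List (List (Int × Int × Int)))
    (seen : PySem.Set (List (Int × Int × Int))) (acc : List (List (Int × Int × Int)))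
    (hinv : ∀ v, PySem.Set.contains seen v = decide (v ∈ acc)) :
    l.foldl (fun acc v => if v ∈ acc then acc else acc ++ [v]) acc
      = (l.foldl
          (fun st v => if PySem.Set.contains st.1 v then st else (PySem.Set.add st.1 v, st.2 ++ [v]))
          (seen, acc)).2 := by
  induction l generalizing seen acc with
  | nil => rfl
  | cons v t ih =>
    by_cases hv : v ∈ acc
    · simp only [List.foldl_cons, if_pos hv, hinv v, decide_eq_true hv, if_pos]
      exact ih seen acc hinv
    · have hcv : PySem.Set.contains seen v = false := by
        rw [hinv v]; exact decide_eq_false hv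
      have hvs : v ∉ seen := by
        simpa [PySem.Set.contains, List.contains_eq_mem] using hcv
      rw [List.foldl_cons, List.foldl_cons, if_neg hv, if_neg (by simp [PySem.Set.contains, List.contains_eq_mem, hvs])]
      refine ih (PySem.Set.add seen v) (acc ++ [v]) ?_
      intro w
      have hiff : w ∈ seen ↔ w ∈ acc := by
        simpa [PySem.Set.contains, List.contains_eq_mem, decide_eq_decide] using hinv w
      simp [PySem.Set.add, PySem.Set.contains, hvs, List.contains_eq_mem, List.mem_append,
        decide_eq_decide, hiff]

theorem dedup_eq (l : List (List (Int × Int × Int))) :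
    l.foldl (fun acc v => if v ∈ acc then acc else acc ++ [v]) [] = bDedup l := by
  unfold bDedup
  exact dedup_eq_aux l PySem.Set.empty [] (by intro v; simp [PySem.Set.contains, PySem.Set.empty])

-- ===== VERDICT (by name: the statement is the Claim_ definition above) =====
theorem calculate_variations_spec : Claim_equal_calculate_variations := by
  intro rpa scanner _ hpre
  unfold Pre_calculate_variations at hpre
  unfold Spec_calculate_variations calculate_variations calculate_variations_alt
  match rpa, hpre with
  | [], _ =>
    simp only [List.length_nil, List.isEmpty_nil, Nat.sub_zero, ite_true]
    rw [loop3, dedup_eq]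
    simp
  | [a], _ =>
    simp only [List.length_cons, List.length_nil]
    rw [show (3 - 1 : Nat) = 2 from rfl, loop2 a]
    simp
  | [a, b], _ =>
    simp only [List.length_cons, List.length_nil]
    rw [show (3 - 2 : Nat) = 1 from rfl, loop1 a b]
    simp
  | a :: b :: c :: t, h => simp at h
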